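-- pv_equiv track=rewrite | github.com/aacuesta/Ying2023NatChem | ligands_near_residue.py | removeLigandEntries
-- ===== SOURCE A (Python) =====
-- def removeLigandEntries(outputList):
--     AdenineLigs = ['112', 'ATP', 'ADP', 'ANP', 'IMP', 'CMP', 'CXR', 'AGS', 'AVU', 'APR', 'ACP', 'A3P', 'AMP', 'PPS', '3AM']
--     GuanineLigs = ['GSP', 'GNP', 'GDP', 'GCP', 'GP2', 'GTG', 'GTP', '5GP', 'G3D', 'G2R', 'G2Q', 'G1R', 'PCG', 'CGR', 'DGP']
--     NADLigs = ['NAP', 'NDP', 'DN4', 'NAD', 'NMN', '2NF', 'NAI']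
--     FADLigs = ['FAD', 'FMN']
--     UridineLigs = ['UPG', 'U5P','U2F', 'UDP', 'U2P', 'GDU', 'OMP', 'UMP','S5P', 'BMP', '6CN', 'NUP', '6AU', 'XMP', '5FU', 'CNU', '5BU', 'DUR', 'UD1']
--     ThymidineLigs = ['TMP', 'TTP', 'TDP', 'ATM', '2DT']
--     CytosineLigs = ['TKW', 'DCP']
--
--     adenineOutput = []
--     guanineOutput = []
--     nadOutput = []
--     fadOutput = []
--     uridineOutput = []
--     thymidineOutput = []
--     cytosineOutput = []
--     remainingOutput = []
--     for line in outputList: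
--         if line[3] in AdenineLigs:
--             adenineOutput.append(line)
--         elif line[3] in GuanineLigs:
--             guanineOutput.append(line)
--         elif line[3] in NADLigs:
--             nadOutput.append(line)
--         elif line[3] in FADLigs:
--             fadOutput.append(line)
--         elif line[3] in UridineLigs:
--             uridineOutput.append(line)
--         elif line[3] in ThymidineLigs:
--             thymidineOutput.append(line)
--         elif line[3] in CytosineLigs:
--             cytosineOutput.append(line)
--         else:
--             remainingOutput.append(line)
--
--     return adenineOutput, guanineOutput, nadOutput, fadOutput, uridineOutput, thymidineOutput, cytosineOutput, remainingOutput
-- ===== SOURCE B (Python) =====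
-- def removeLigandEntries(outputList):
--     AdenineLigs = {'112', 'ATP', 'ADP', 'ANP', 'IMP', 'CMP', 'CXR', 'AGS', 'AVU', 'APR', 'ACP', 'A3P', 'AMP', 'PPS', '3AM'}
--     GuanineLigs = {'GSP', 'GNP', 'GDP', 'GCP', 'GP2', 'GTG', 'GTP', '5GP', 'G3D', 'G2R', 'G2Q', 'G1R', 'PCG', 'CGR', 'DGP'}
--     NADLigs = {'NAP', 'NDP', 'DN4', 'NAD', 'NMN', '2NF', 'NAI'}
--     FADLigs = {'FAD', 'FMN'}
--     UridineLigs = {'UPG', 'U5P', 'U2F', 'UDP', 'U2P', 'GDU', 'OMP', 'UMP', 'S5P', 'BMP', '6CN', 'NUP', '6AU', 'XMP', '5FU', 'CNU', '5BU', 'DUR', 'UD1'}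
--     ThymidineLigs = {'TMP', 'TTP', 'TDP', 'ATM', '2DT'}
--     CytosineLigs = {'TKW', 'DCP'}
--     # The seven category sets are pairwise disjoint, so independent filter
--     # passes produce exactly the same partition as a first-match ladder.
--     known = AdenineLigs | GuanineLigs | NADLigs | FADLigs | UridineLigs | ThymidineLigs | CytosineLigs
--     return ([line for line in outputList if line[3] in AdenineLigs],
--             [line for line in outputList if line[3] in GuanineLigs],
--             [line for line in outputList if line[3] in NADLigs],
--             [line for line in outputList if line[3] in FADLigs],
--             [line for line in outputList if line[3] in UridineLigs],
--             [line for line in outputList if line[3] in ThymidineLigs],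
--             [line for line in outputList if line[3] in CytosineLigs],
--             [line for line in outputList if line[3] not in known])
-- ===== Notes on version B (the rewrite author's own statement) =====
-- stated objective: alternative
-- what changed: Replaces A's single pass with an 8-way if/elif ladder and eight mutable accumulators by eight independent filter passes (one comprehension per bucket over set membership, remaining = not in the union), correct because the seven category lists are pairwise disjoint.
import Mathlib
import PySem

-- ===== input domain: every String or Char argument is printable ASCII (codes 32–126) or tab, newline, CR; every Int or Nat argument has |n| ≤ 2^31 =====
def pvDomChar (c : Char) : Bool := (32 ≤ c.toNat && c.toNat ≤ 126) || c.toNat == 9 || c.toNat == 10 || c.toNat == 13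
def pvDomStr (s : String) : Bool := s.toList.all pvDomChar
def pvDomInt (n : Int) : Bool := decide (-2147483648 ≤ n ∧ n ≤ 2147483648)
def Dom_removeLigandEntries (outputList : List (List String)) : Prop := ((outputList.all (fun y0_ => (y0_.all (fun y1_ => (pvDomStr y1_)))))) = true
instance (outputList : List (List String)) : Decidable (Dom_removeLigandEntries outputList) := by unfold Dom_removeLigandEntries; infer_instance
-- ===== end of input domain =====

-- B replaces A's single-pass if/elif ladder with eight independent filter passes
-- (one per bucket; remaining = keys not in the union), valid since the seven
-- category lists are pairwise disjoint (alternative decomposition, similar cost).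


-- ===== PORT A =====
def pvAdenineLigs : List String := ["112", "ATP", "ADP", "ANP", "IMP", "CMP", "CXR", "AGS", "AVU", "APR", "ACP", "A3P", "AMP", "PPS", "3AM"]
def pvGuanineLigs : List String := ["GSP", "GNP", "GDP", "GCP", "GP2", "GTG", "GTP", "5GP", "G3D", "G2R", "G2Q", "G1R", "PCG", "CGR", "DGP"]
def pvNADLigs : List String := ["NAP", "NDP", "DN4", "NAD", "NMN", "2NF", "NAI"]
def pvFADLigs : List String := ["FAD", "FMN"]
def pvUridineLigs : List String := ["UPG", "U5P", "U2F", "UDP", "U2P", "GDU", "OMP", "UMP", "S5P", "BMP", "6CN", "NUP", "6AU", "XMP", "5FU", "CNU", "5BU", "DUR", "UD1"]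
def pvThymidineLigs : List String := ["TMP", "TTP", "TDP", "ATM", "2DT"]
def pvCytosineLigs : List String := ["TKW", "DCP"]

-- line[3] is ported as (pyGet? line 3).getD "": under Pre_ (every line has ≥ 4 fields) the default is unreachable.
def pvKey (line : List String) : String := (PySem.List.pyGet? line 3).getD ""

-- A's loop body: the if/elif ladder appending to one of the eight accumulators.
def pvStepA (st : List (List String) × List (List String) × List (List String) × List (List String) × List (List String) × List (List String) × List (List String) × List (List String)) (line : List String) : List (List String) × List (List String) × List (List String) × List (List String) × List (List String) × List (List String) × List (List String) × List (List String) :=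
  let (a, g, n, f, u, t, c, r) := st
  let key := pvKey line
  if pvAdenineLigs.contains key then (a ++ [line], g, n, f, u, t, c, r)
  else if pvGuanineLigs.contains key then (a, g ++ [line], n, f, u, t, c, r)
  else if pvNADLigs.contains key then (a, g, n ++ [line], f, u, t, c, r)
  else if pvFADLigs.contains key then (a, g, n, f ++ [line], u, t, c, r)
  else if pvUridineLigs.contains key then (a, g, n, f, u ++ [line], t, c, r)
  else if pvThymidineLigs.contains key then (a, g, n, f, u, t ++ [line], c, r)
  else if pvCytosineLigs.contains key then (a, g, n, f, u, t, c ++ [line], r)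
  else (a, g, n, f, u, t, c, r ++ [line])

def removeLigandEntries (outputList : List (List String)) : List (List String) × List (List String) × List (List String) × List (List String) × List (List String) × List (List String) × List (List String) × List (List String) :=
  outputList.foldl pvStepA ([], [], [], [], [], [], [], [])

-- ===== PORT B =====
-- known = union of the seven category sets (the sets are pairwise disjoint, so the list of distinct elements is the concatenation)
def pvKnownLigs : List String :=
  pvAdenineLigs ++ pvGuanineLigs ++ pvNADLigs ++ pvFADLigs ++ pvUridineLigs ++ pvThymidineLigs ++ pvCytosineLigs

def removeLigandEntries_alt (outputList : List (List String)) : List (List String) × List (List String) × List (List String) × List (List String) × List (List String) × List (List String) × List (List String) × List (List String) :=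
  (outputList.filter (fun l => pvAdenineLigs.contains (pvKey l)),
   outputList.filter (fun l => pvGuanineLigs.contains (pvKey l)),
   outputList.filter (fun l => pvNADLigs.contains (pvKey l)),
   outputList.filter (fun l => pvFADLigs.contains (pvKey l)),
   outputList.filter (fun l => pvUridineLigs.contains (pvKey l)),
   outputList.filter (fun l => pvThymidineLigs.contains (pvKey l)),
   outputList.filter (fun l => pvCytosineLigs.contains (pvKey l)),
   outputList.filter (fun l => !(pvKnownLigs.contains (pvKey l))))

-- ===== PRECONDITION & SPEC =====
-- Pre_ excludes exactly the inputs where the Python A raises IndexError: a line with fewer than 4 fields.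
def Pre_removeLigandEntries (outputList : List (List String)) : Prop :=
  ∀ line ∈ outputList, 4 ≤ line.length
instance (outputList : List (List String)) : Decidable (Pre_removeLigandEntries outputList) := by unfold Pre_removeLigandEntries; infer_instance

def pvWitness_removeLigandEntries : List (List String) := [["A", "12", "X", "ATP"], ["B", "7", "Y", "ZZZ"]]

def Spec_removeLigandEntries (outputList : List (List String)) (out : List (List String) × List (List String) × List (List String) × List (List String) × List (List String) × List (List String) × List (List String) × List (List String)) : Prop := out = removeLigandEntries_alt outputList
instance (outputList : List (List String)) (out : List (List String) × List (List String) × List (List String) × List (List String) × List (List String) × List (List String) × List (List String) × List (List String)) : Decidable (Spec_removeLigandEntries outputList out) := by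
  unfold Spec_removeLigandEntries
  letI d2 : DecidableEq (List (List String) × List (List String)) := instDecidableEqProd
  letI d3 : DecidableEq (List (List String) × List (List String) × List (List String)) := instDecidableEqProd
  letI d4 : DecidableEq (List (List String) × List (List String) × List (List String) × List (List String)) := instDecidableEqProd
  letI d5 : DecidableEq (List (List String) × List (List String) × List (List String) × List (List String) × List (List String)) := instDecidableEqProd
  letI d6 : DecidableEq (List (List String) × List (List String) × List (List String) × List (List String) × List (List String) × List (List String)) := instDecidableEqProd
  letI d7 : DecidableEq (List (List String) × List (List String) × List (List String) × List (List String) × List (List String) × List (List String) × List (List String)) := instDecidableEqProd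
  exact instDecidableEqProd _ _

-- ===== CLAIM (what is proved, stated in full; the proofs are below) =====
def Claim_equal_removeLigandEntries : Prop := ∀ (outputList : List (List String)), Dom_removeLigandEntries outputList → Pre_removeLigandEntries outputList → Spec_removeLigandEntries outputList (removeLigandEntries outputList)

-- ===== LEMMAS AND PROOFS =====

-- disjointness transfer: if every element of l1 is outside l2, membership in l2 excludes membership in l1
theorem pv_dis (l1 l2 : List String) (h : l1.all (fun x => !(l2.contains x)) = true)
    {s : String} (hs : s ∈ l2) : s ∉ l1 := by
  simp only [List.all_eq_true, Bool.not_eq_true', List.contains_eq_mem, decide_eq_false_iff_not] at h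
  exact fun hl => h s hl hs

-- contains on the concatenated union
theorem pv_known_contains (s : String) :
    pvKnownLigs.contains s
      = (pvAdenineLigs.contains s || pvGuanineLigs.contains s || pvNADLigs.contains s ||
         pvFADLigs.contains s || pvUridineLigs.contains s || pvThymidineLigs.contains s ||
         pvCytosineLigs.contains s) := by
  simp [pvKnownLigs, List.contains_eq_mem, List.mem_append, Bool.or_assoc]

-- A's step written with B's independent conditions
theorem pv_stepA_eq (st : List (List String) × List (List String) × List (List String) × List (List String) × List (List String) × List (List String) × List (List String) × List (List String)) (line : List String) :
    pvStepA st line =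
      (st.1 ++ if pvAdenineLigs.contains (pvKey line) then [line] else [],
       st.2.1 ++ if pvGuanineLigs.contains (pvKey line) then [line] else [],
       st.2.2.1 ++ if pvNADLigs.contains (pvKey line) then [line] else [],
       st.2.2.2.1 ++ if pvFADLigs.contains (pvKey line) then [line] else [],
       st.2.2.2.2.1 ++ if pvUridineLigs.contains (pvKey line) then [line] else [],
       st.2.2.2.2.2.1 ++ if pvThymidineLigs.contains (pvKey line) then [line] else [],
       st.2.2.2.2.2.2.1 ++ if pvCytosineLigs.contains (pvKey line) then [line] else [],
       st.2.2.2.2.2.2.2 ++ if !(pvKnownLigs.contains (pvKey line)) then [line] else []) := by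
  obtain ⟨a, g, n, f, u, t, c, r⟩ := st
  simp only [pvStepA, pv_known_contains]
  set key := pvKey line with hk
  by_cases h0 : key ∈ pvAdenineLigs
  · simp [h0, pv_dis pvGuanineLigs pvAdenineLigs (by decide) h0,
      pv_dis pvNADLigs pvAdenineLigs (by decide) h0,
      pv_dis pvFADLigs pvAdenineLigs (by decide) h0,
      pv_dis pvUridineLigs pvAdenineLigs (by decide) h0,
      pv_dis pvThymidineLigs pvAdenineLigs (by decide) h0,
      pv_dis pvCytosineLigs pvAdenineLigs (by decide) h0]
  · by_cases h1 : key ∈ pvGuanineLigs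
    · simp [h0, h1, pv_dis pvNADLigs pvGuanineLigs (by decide) h1,
        pv_dis pvFADLigs pvGuanineLigs (by decide) h1,
        pv_dis pvUridineLigs pvGuanineLigs (by decide) h1,
        pv_dis pvThymidineLigs pvGuanineLigs (by decide) h1,
        pv_dis pvCytosineLigs pvGuanineLigs (by decide) h1]
    · by_cases h2 : key ∈ pvNADLigs
      · simp [h0, h1, h2, pv_dis pvFADLigs pvNADLigs (by decide) h2,
          pv_dis pvUridineLigs pvNADLigs (by decide) h2,
          pv_dis pvThymidineLigs pvNADLigs (by decide) h2,
          pv_dis pvCytosineLigs pvNADLigs (by decide) h2]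
      · by_cases h3 : key ∈ pvFADLigs
        · simp [h0, h1, h2, h3, pv_dis pvUridineLigs pvFADLigs (by decide) h3,
            pv_dis pvThymidineLigs pvFADLigs (by decide) h3,
            pv_dis pvCytosineLigs pvFADLigs (by decide) h3]
        · by_cases h4 : key ∈ pvUridineLigs
          · simp [h0, h1, h2, h3, h4, pv_dis pvThymidineLigs pvUridineLigs (by decide) h4,
              pv_dis pvCytosineLigs pvUridineLigs (by decide) h4]
          · by_cases h5 : key ∈ pvThymidineLigs
            · simp [h0, h1, h2, h3, h4, h5, pv_dis pvCytosineLigs pvThymidineLigs (by decide) h5]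
            · by_cases h6 : key ∈ pvCytosineLigs
              · simp [h0, h1, h2, h3, h4, h5, h6]
              · simp [h0, h1, h2, h3, h4, h5, h6]

-- pulling a conditional singleton through an append
theorem pv_ite_append {α : Type} (c : Prop) [Decidable c] (y : α) (zs : List α) :
    (if c then [y] else []) ++ zs = if c then y :: zs else zs := by
  split_ifs <;> simp

-- fold invariant: A's fold from any state is the state with B's filters appended componentwise
theorem pv_fold_eq (lines : List (List String)) (st : List (List String) × List (List String) × List (List String) × List (List String) × List (List String) × List (List String) × List (List String) × List (List String)) :
    lines.foldl pvStepA st =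
      (st.1 ++ lines.filter (fun l => pvAdenineLigs.contains (pvKey l)),
       st.2.1 ++ lines.filter (fun l => pvGuanineLigs.contains (pvKey l)),
       st.2.2.1 ++ lines.filter (fun l => pvNADLigs.contains (pvKey l)),
       st.2.2.2.1 ++ lines.filter (fun l => pvFADLigs.contains (pvKey l)),
       st.2.2.2.2.1 ++ lines.filter (fun l => pvUridineLigs.contains (pvKey l)),
       st.2.2.2.2.2.1 ++ lines.filter (fun l => pvThymidineLigs.contains (pvKey l)),
       st.2.2.2.2.2.2.1 ++ lines.filter (fun l => pvCytosineLigs.contains (pvKey l)),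
       st.2.2.2.2.2.2.2 ++ lines.filter (fun l => !(pvKnownLigs.contains (pvKey l)))) := by
  induction lines generalizing st with
  | nil => simp
  | cons l ls ih =>
      simp only [List.foldl_cons, ih, pv_stepA_eq, List.filter_cons, List.append_assoc,
        pv_ite_append]

-- ===== VERDICT (by name: the statement is the Claim_ definition above) =====
theorem removeLigandEntries_spec : Claim_equal_removeLigandEntries := by
  intro outputList _ _
  unfold Spec_removeLigandEntries removeLigandEntries removeLigandEntries_alt
  simp [pv_fold_eq]
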